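-- pv_equiv track=rewrite | github.com/wexample/wex | src/helper/patch.py | patch_get_initial_parts
-- ===== SOURCE A (Python) =====
-- from typing import List, Optional
--
-- def patch_get_initial_parts(patch_content: str) -> List[List[str]]:
--     """
--     Extract contiguous groups of lines starting with ' ' or '-', ignoring lines starting with '+' or other characters.
--
--     Args:
--     patch_content (str): The content of the patch file as a string.
--
--     Returns:
--     List[List[str]]: A list of groups, each containing lines starting with ' ' or '-'.
--     """
--     lines = patch_content.split("\n")  # Split the content into individual lines
--     result = []
--     current_group = []
--
--     for line in lines:
--         if line.startswith(" ") or line.startswith("-"):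
--             # If the line starts with ' ' or '-', add it to the current group
--             current_group.append(line[1:])
--         elif current_group:
--             # If a new line doesn't match and there is an existing group, save it and start a new group
--             result.append(current_group)
--             current_group = []
--
--     # Add the last group if it's not empty
--     if current_group:
--         result.append(current_group)
--
--     return result
-- ===== SOURCE B (Python) =====
-- def patch_get_initial_parts(patch_content: str):
--     """Two-pointer run extraction: scan each maximal run of ' '/'-' lines at once."""
--     lines = patch_content.split("\n")
--     result = []
--     i, n = 0, len(lines)
--     while i < n:
--         if lines[i].startswith((' ', '-')):
--             j = i + 1
--             while j < n and lines[j].startswith((' ', '-')):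
--                 j += 1
--             result.append([line[1:] for line in lines[i:j]])
--             i = j
--         else:
--             i += 1
--     return result
-- ===== Notes on version B (the rewrite author's own statement) =====
-- stated objective: alternative
-- what changed: Replaces the flush-on-mismatch accumulator (current_group appended line by line, flushed when a non-matching line or the end appears) with a two-pointer scan that extracts each maximal run of matching lines in one step and appends the whole run at once.
import Mathlib
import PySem

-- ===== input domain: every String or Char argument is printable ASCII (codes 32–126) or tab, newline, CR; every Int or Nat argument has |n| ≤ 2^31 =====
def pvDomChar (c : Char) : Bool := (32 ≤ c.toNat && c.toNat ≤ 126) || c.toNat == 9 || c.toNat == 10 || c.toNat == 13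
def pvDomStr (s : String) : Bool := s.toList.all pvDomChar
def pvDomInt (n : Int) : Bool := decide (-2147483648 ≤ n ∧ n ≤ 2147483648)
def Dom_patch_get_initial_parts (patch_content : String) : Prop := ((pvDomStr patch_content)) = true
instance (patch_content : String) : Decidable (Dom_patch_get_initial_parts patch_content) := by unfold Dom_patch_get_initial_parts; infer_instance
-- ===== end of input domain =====

-- B replaces A's flush-on-mismatch accumulator with a two-pointer maximal-run scan; alternative decomposition, same cost.

-- ===== PORT A =====
-- line.startswith(" ") or line.startswith("-")
def pvKeep (line : String) : Bool :=
  PySem.Str.startswith line " " || PySem.Str.startswith line "-"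

-- line[1:]
def pvTail (line : String) : String := PySem.Str.slice line (some 1) none

def patch_get_initial_parts (patch_content : String) : List (List String) :=
  let lines := (PySem.Str.split? patch_content "\n").getD []
  let st := lines.foldl
    (fun (st : List (List String) × List String) line =>
      if pvKeep line then (st.1, st.2 ++ [pvTail line])
      else if !st.2.isEmpty then (st.1 ++ [st.2], [])
      else st)
    ([], [])
  if !st.2.isEmpty then st.1 ++ [st.2] else st.1

-- ===== PORT B =====
-- the inner 'while j < n and keep' scan is rest.takeWhile, continuing at j is rest.dropWhile;
-- the fuel argument (= list length) only makes the recursion structural, it never cuts the computation short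
def pvGroupsF : Nat → List String → List (List String)
  | 0, _ => []
  | _, [] => []
  | fuel + 1, l :: rest =>
    if pvKeep l then
      ((l :: rest.takeWhile pvKeep).map pvTail) :: pvGroupsF fuel (rest.dropWhile pvKeep)
    else pvGroupsF fuel rest

def pvGroups (lines : List String) : List (List String) := pvGroupsF lines.length lines

def patch_get_initial_parts_alt (patch_content : String) : List (List String) :=
  pvGroups ((PySem.Str.split? patch_content "\n").getD [])

-- ===== PRECONDITION & SPEC =====
def Spec_patch_get_initial_parts (patch_content : String) (out : List (List String)) : Prop := out = patch_get_initial_parts_alt patch_content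
instance (patch_content : String) (out : List (List String)) : Decidable (Spec_patch_get_initial_parts patch_content out) := by unfold Spec_patch_get_initial_parts; infer_instance

-- ===== CLAIM (what is proved, stated in full; the proofs are below) =====
def Claim_equal_patch_get_initial_parts : Prop := ∀ (patch_content : String), Dom_patch_get_initial_parts patch_content → Spec_patch_get_initial_parts patch_content (patch_get_initial_parts patch_content)

-- ===== LEMMAS AND PROOFS =====

-- the fuel is irrelevant once it covers the list length
lemma pvGroupsF_fuel_irrel : ∀ (n m : Nat) (lines : List String),
    lines.length ≤ n → lines.length ≤ m → pvGroupsF n lines = pvGroupsF m lines := by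
  intro n
  induction n with
  | zero =>
    intro m lines hn _
    have : lines = [] := List.eq_nil_of_length_eq_zero (Nat.le_zero.mp hn)
    subst this
    cases m <;> rfl
  | succ n ih =>
    intro m lines hn hm
    cases lines with
    | nil => cases m <;> rfl
    | cons l rest =>
      cases m with
      | zero => simp at hm
      | succ m =>
        simp only [pvGroupsF]
        by_cases hk : pvKeep l
        · simp only [hk, if_pos]
          have h1 : (rest.dropWhile pvKeep).length ≤ n :=
            le_trans (List.length_dropWhile_le _ _) (by simpa using hn)
          have h2 : (rest.dropWhile pvKeep).length ≤ m :=
            le_trans (List.length_dropWhile_le _ _) (by simpa using hm)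
          rw [ih m _ h1 h2]
        · simp only [hk, Bool.false_eq_true, if_false]
          exact ih m rest (by simpa using hn) (by simpa using hm)

@[simp] lemma pvGroups_nil : pvGroups [] = [] := rfl

lemma pvGroups_cons (l : String) (rest : List String) :
    pvGroups (l :: rest) =
      if pvKeep l then
        ((l :: rest.takeWhile pvKeep).map pvTail) :: pvGroups (rest.dropWhile pvKeep)
      else pvGroups rest := by
  unfold pvGroups
  simp only [List.length_cons, pvGroupsF]
  by_cases hk : pvKeep l
  · simp only [hk, if_pos]
    rw [pvGroupsF_fuel_irrel rest.length (rest.dropWhile pvKeep).length (rest.dropWhile pvKeep)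
      (List.length_dropWhile_le _ _) le_rfl]
  · simp [hk]

-- invariant of A's fold: the pending group cur, once nonempty, absorbs the current run
lemma pv_fold_eq (lines : List String) (res : List (List String)) (cur : List String) :
    (let st := lines.foldl
      (fun (st : List (List String) × List String) line =>
        if pvKeep line then (st.1, st.2 ++ [pvTail line])
        else if !st.2.isEmpty then (st.1 ++ [st.2], [])
        else st)
      (res, cur);
     if !st.2.isEmpty then st.1 ++ [st.2] else st.1) =
    res ++ (if cur.isEmpty then pvGroups lines
            else (cur ++ (lines.takeWhile pvKeep).map pvTail) :: pvGroups (lines.dropWhile pvKeep)) := by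
  induction lines generalizing res cur with
  | nil =>
    simp only [List.foldl]
    by_cases h : cur.isEmpty <;>
      simp_all [List.isEmpty_iff]
  | cons l rest ih =>
    simp only [List.foldl]
    by_cases hk : pvKeep l
    · simp only [hk, if_pos]
      rw [ih]
      have hne : (cur ++ [pvTail l]).isEmpty = false := by simp
      by_cases hc : cur.isEmpty
      · have : cur = [] := List.isEmpty_iff.mp hc
        subst this
        simp [pvGroups_cons, hk]
      · simp [hne, hc, hk]
    · simp only [hk, if_neg, Bool.false_eq_true, not_false_iff]
      by_cases hc : cur.isEmpty
      · have : cur = [] := List.isEmpty_iff.mp hc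
        subst this
        simp only [List.isEmpty_nil, Bool.not_true, Bool.false_eq_true, if_false]
        rw [ih]
        simp [pvGroups_cons, hk]
      · have hc0 : cur.isEmpty = false := by
          cases h : cur.isEmpty
          · rfl
          · exact absurd h hc
        simp only [hc0, Bool.not_false, if_true]
        rw [ih]
        simp [hk, pvGroups_cons]

-- ===== VERDICT (by name: the statement is the Claim_ definition above) =====
theorem patch_get_initial_parts_spec : Claim_equal_patch_get_initial_parts := by
  intro patch_content _
  unfold Spec_patch_get_initial_parts patch_get_initial_parts patch_get_initial_parts_alt
  rw [pv_fold_eq]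
  simp
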